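-- pv_equiv track=rewrite | github.com/CarlaBuongiorno/learning-by-doing | 02-working-with-data/report_hard.py | best_rated_actor
-- ===== SOURCE A (Python) =====
-- def best_rated_actor(actor_dict):
--     for actor, rating_list in actor_dict.items():
--         actor_dict[actor] = sum(rating_list)//len(rating_list)
--     best_actor_list = []
--     for actors, rating in actor_dict.items():
--         if rating == max(actor_dict.values()):
--             best_actor_list.append(actors)
--     return best_actor_list
-- ===== SOURCE B (Python) =====
-- def best_rated_actor(actor_dict):
--     # one pass: compute each average, store it back (same in-place mutation as A),
--     # and maintain the running best average together with the list of tied actors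
--     best = None
--     best_actor_list = []
--     for actor, rating_list in actor_dict.items():
--         avg = sum(rating_list) // len(rating_list)
--         actor_dict[actor] = avg
--         if best is None or avg > best:
--             best = avg
--             best_actor_list = [actor]
--         elif avg == best:
--             best_actor_list.append(actor)
--     return best_actor_list
-- ===== Notes on version B (the rewrite author's own statement) =====
-- stated objective: faster
-- what changed: Replaces A's second loop, which recomputes max(actor_dict.values()) on every iteration, by a single combined pass that maintains a running best average and the list of tied actors (resetting on a strictly better average, appending on a tie).
import Mathlib
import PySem

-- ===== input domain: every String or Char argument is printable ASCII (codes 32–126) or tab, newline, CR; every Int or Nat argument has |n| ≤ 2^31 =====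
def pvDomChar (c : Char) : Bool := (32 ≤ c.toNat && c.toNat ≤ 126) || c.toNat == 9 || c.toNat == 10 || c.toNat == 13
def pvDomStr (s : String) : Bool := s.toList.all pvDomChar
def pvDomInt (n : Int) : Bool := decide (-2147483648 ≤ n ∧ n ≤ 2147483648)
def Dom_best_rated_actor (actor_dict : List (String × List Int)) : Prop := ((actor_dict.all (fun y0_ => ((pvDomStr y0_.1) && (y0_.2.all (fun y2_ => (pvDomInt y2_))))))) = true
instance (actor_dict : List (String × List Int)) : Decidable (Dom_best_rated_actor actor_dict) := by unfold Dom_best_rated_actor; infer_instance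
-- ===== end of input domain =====

-- B fuses A's two passes into one: a single fold maintains the running best average and
-- the list of tied actors, instead of re-scanning all values with max() on every iteration.
-- Both programs also mutate actor_dict in place (values become averages); the theorem is
-- about the return value only (B performs the same mutation).


-- sum(rating_list)//len(rating_list)  (used verbatim by both Pythons)
def pyAvg (rs : List Int) : Int := PySem.Int.floordiv (rs.foldl (· + ·) 0) (rs.length : Int)

-- ===== PORT A =====
def best_rated_actor (actor_dict : List (String × List Int)) : List String :=
  -- first loop: only the VALUES of the dict are reassigned while iterating, so the dict
  -- becomes the in-order map of the averages (exact: keys and their order are unchanged)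
  let d : List (String × Int) := actor_dict.map (fun p => (p.1, pyAvg p.2))
  -- second loop: 'if rating == max(actor_dict.values()): best_actor_list.append(actors)'
  d.foldl (fun acc p =>
    if some p.2 = PySem.List.max? (d.map Prod.snd) (fun y => y) then acc ++ [p.1] else acc) []

-- ===== PORT B =====
-- loop body of B: state = (best : Option Int, best_actor_list)
def bStep (st : Option Int × List String) (p : String × List Int) : Option Int × List String :=
  let avg := pyAvg p.2
  match st.1 with
  | none => (some avg, [p.1])
  | some b =>
    if b < avg then (some avg, [p.1])
    else if avg = b then (some b, st.2 ++ [p.1])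
    else st

def best_rated_actor_alt (actor_dict : List (String × List Int)) : List String :=
  (actor_dict.foldl bStep (none, [])).2

-- ===== PRECONDITION & SPEC =====
-- Pre_ excludes inputs with an empty rating list (A raises ZeroDivisionError there) and
-- inputs with duplicate actor keys (impossible for A's Python dict argument, so the
-- assoc-list encoding of that corner represents no dict A could receive).
def Pre_best_rated_actor (actor_dict : List (String × List Int)) : Prop :=
  (actor_dict.map Prod.fst).Nodup ∧ ∀ p ∈ actor_dict, p.2 ≠ []
instance (actor_dict : List (String × List Int)) : Decidable (Pre_best_rated_actor actor_dict) := by unfold Pre_best_rated_actor; infer_instance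

def pvWitness_best_rated_actor : (List (String × List Int)) := [("ann", [4, 5]), ("bob", [5])]

def Spec_best_rated_actor (actor_dict : List (String × List Int)) (out : List String) : Prop := out = best_rated_actor_alt actor_dict
instance (actor_dict : List (String × List Int)) (out : List String) : Decidable (Spec_best_rated_actor actor_dict out) := by unfold Spec_best_rated_actor; infer_instance

-- ===== CLAIM (what is proved, stated in full; the proofs are below) =====
def Claim_equal_best_rated_actor : Prop := ∀ (actor_dict : List (String × List Int)), Dom_best_rated_actor actor_dict → Pre_best_rated_actor actor_dict → Spec_best_rated_actor actor_dict (best_rated_actor actor_dict)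

-- ===== LEMMAS AND PROOFS =====

-- bStep on an averaged pair, as a standalone step over (String × Int)
def bStep' (st : Option Int × List String) (q : String × Int) : Option Int × List String :=
  match st.1 with
  | none => (some q.2, [q.1])
  | some b =>
    if b < q.2 then (some q.2, [q.1])
    else if q.2 = b then (some b, st.2 ++ [q.1])
    else st

lemma max?_id_append_last (vs : List Int) (v : Int) :
    PySem.List.max? (vs ++ [v]) (fun y => y) =
      some (match PySem.List.max? vs (fun y => y) with | none => v | some m => max m v) := by
  cases vs with
  | nil => simp [PySem.List.max?]
  | cons x t =>
    rw [show (x :: t) ++ [v] = x :: (t ++ [v]) from rfl,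
        PySem.List.max?_id_cons, PySem.List.max?_id_cons, List.foldl_append]
    simp [max_def]

lemma fold_char (l : List (String × Int)) :
    List.foldl bStep' (none, []) l =
      (PySem.List.max? (l.map Prod.snd) (fun y => y),
       (l.filter (fun p =>
          decide (some p.2 = PySem.List.max? (l.map Prod.snd) (fun y => y)))).map Prod.fst) := by
  induction l using List.reverseRecOn with
  | nil => simp [PySem.List.max?]
  | append_singleton l q ih =>
    rw [List.foldl_append, ih, List.foldl_cons, List.foldl_nil]
    rw [List.map_append, List.map_singleton, max?_id_append_last]
    cases h : PySem.List.max? (l.map Prod.snd) (fun y => y) with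
    | none =>
      have hl : l = [] := by
        have := (PySem.List.max?_eq_none_iff (l.map Prod.snd) (fun y => y)).mp h
        exact List.map_eq_nil_iff.mp this
      subst hl
      simp [bStep']
    | some m =>
      have hmax : ∀ p ∈ l, p.2 ≤ m := by
        intro p hp
        exact PySem.List.max?_isMax h p.2 (List.mem_map_of_mem hp)
      rw [show (match (some m : Option Int) with | none => q.2 | some m => max m q.2)
            = max m q.2 from rfl]
      rcases lt_trichotomy m q.2 with hlt | heq | hgt
      · -- strictly better average: reset
        have hfilt : l.filter (fun p => decide (some p.2 = some q.2)) = [] := by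
          refine List.filter_eq_nil_iff.mpr ?_
          intro p hp
          have hb := hmax p hp
          simp only [decide_eq_true_eq, Option.some_inj]
          omega
        rw [max_eq_right hlt.le]
        simp only [bStep', hlt, if_pos, List.filter_append, hfilt]
        simp
      · -- tie: append
        subst heq
        simp [bStep', List.filter_append]
      · -- worse: unchanged
        have hq : ¬ (q.2 = m) := by omega
        simp [bStep', not_lt.mpr hgt.le, hq, List.filter_append, max_eq_left hgt.le]

-- ===== VERDICT (by name: the statement is the Claim_ definition above) =====
theorem best_rated_actor_spec : Claim_equal_best_rated_actor := by
  intro actor_dict _ _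
  show best_rated_actor actor_dict = best_rated_actor_alt actor_dict
  have hB : best_rated_actor_alt actor_dict =
      (List.foldl bStep' (none, []) (actor_dict.map (fun p => (p.1, pyAvg p.2)))).2 := by
    unfold best_rated_actor_alt
    rw [show List.foldl bStep ((none : Option Int), ([] : List String)) actor_dict
        = List.foldl bStep' (none, []) (actor_dict.map (fun p => (p.1, pyAvg p.2))) from by
      rw [List.foldl_map]
      rfl]
  rw [hB, fold_char]
  have hA : List.foldl (fun (acc : List String) (p : String × Int) =>
        if some p.2 = PySem.List.max? ((actor_dict.map (fun p => (p.1, pyAvg p.2))).map Prod.snd) (fun y => y)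
        then acc ++ [p.1] else acc) [] (actor_dict.map (fun p => (p.1, pyAvg p.2)))
      = ((actor_dict.map (fun p => (p.1, pyAvg p.2))).filter (fun p =>
          decide (some p.2 = PySem.List.max? ((actor_dict.map (fun p => (p.1, pyAvg p.2))).map Prod.snd) (fun y => y)))).map Prod.fst := by
    have hif : (fun (acc : List String) (p : String × Int) =>
          if some p.2 = PySem.List.max? ((actor_dict.map (fun p => (p.1, pyAvg p.2))).map Prod.snd) (fun y => y)
          then acc ++ [p.1] else acc)
        = (fun acc p =>
          if (fun (p : String × Int) => decide (some p.2 = PySem.List.max? ((actor_dict.map (fun p => (p.1, pyAvg p.2))).map Prod.snd) (fun y => y))) p = true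
          then acc ++ [p.1] else acc) := by
      funext acc p
      simp
    rw [hif, PySem.List.foldl_append_if]
    simp
  exact hA
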